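-- pv_equiv track=rewrite | github.com/krenak/BSI | 2024-2/prog2/exercicios/arquivo/libmatriz.py | deslocaEsq
-- ===== SOURCE A (Python) =====
-- def deslocaEsq(matriz):
--     for i in range(len(matriz)):
--         for j in range(len(matriz[i])):
--             if j != (len(matriz[i]) - 1):
--                 matriz[i][j] = matriz[i][j + 1]
--             else:
--                 matriz[i][j] = 0
--
--     return matriz
-- ===== SOURCE B (Python) =====
-- def deslocaEsq(matriz):
--     for row in matriz:
--         if row:
--             row[:] = row[1:] + [0]
--     return matriz
-- ===== Notes on version B (the rewrite author's own statement) =====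
-- stated objective: simpler
-- what changed: Replaces the per-cell index loop (copying each element from its right neighbour, zeroing the last) by a per-row in-place slice assignment row[:] = row[1:] + [0], skipping empty rows.
import Mathlib
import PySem

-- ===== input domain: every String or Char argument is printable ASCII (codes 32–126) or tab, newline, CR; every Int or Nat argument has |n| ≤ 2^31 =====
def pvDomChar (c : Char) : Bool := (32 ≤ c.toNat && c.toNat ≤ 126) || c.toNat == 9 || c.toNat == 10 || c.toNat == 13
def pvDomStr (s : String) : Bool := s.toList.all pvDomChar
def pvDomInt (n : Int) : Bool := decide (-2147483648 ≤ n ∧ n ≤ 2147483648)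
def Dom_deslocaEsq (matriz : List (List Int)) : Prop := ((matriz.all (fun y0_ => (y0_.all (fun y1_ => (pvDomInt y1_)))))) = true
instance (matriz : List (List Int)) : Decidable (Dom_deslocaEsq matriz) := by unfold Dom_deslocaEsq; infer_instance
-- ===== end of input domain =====

-- B replaces A's per-cell inner index loop by one whole-row rebuild (drop head, append 0); objective: simpler.
-- Both Pythons mutate `matriz`'s rows in place identically; the equivalence proved is about the return value.

-- ===== PORT A =====
-- inner loop: for j in range(len(matriz[i])): if j != len-1: row[j] = row[j+1] else: row[j] = 0
def pvInnerA (r : List Int) : List Int :=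
  (PySem.List.pyRange 0 (r.length : Int) 1).foldl
    (fun s j =>
      if j ≠ (r.length : Int) - 1 then s.set j.toNat (s.getD (j.toNat + 1) 0)
      else s.set j.toNat 0) r

def deslocaEsq (matriz : List (List Int)) : List (List Int) :=
  (PySem.List.pyRange 0 (matriz.length : Int) 1).foldl
    (fun m i => m.set i.toNat (pvInnerA (m.getD i.toNat []))) matriz

-- ===== PORT B =====
def deslocaEsq_alt (matriz : List (List Int)) : List (List Int) :=
  matriz.map (fun row => if row.isEmpty then row else row.drop 1 ++ [0])

-- ===== PRECONDITION & SPEC =====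
def Spec_deslocaEsq (matriz : List (List Int)) (out : List (List Int)) : Prop := out = deslocaEsq_alt matriz
instance (matriz : List (List Int)) (out : List (List Int)) : Decidable (Spec_deslocaEsq matriz out) := by unfold Spec_deslocaEsq; infer_instance

-- ===== CLAIM (what is proved, stated in full; the proofs are below) =====
def Claim_equal_deslocaEsq : Prop := ∀ (matriz : List (List Int)), Dom_deslocaEsq matriz → Spec_deslocaEsq matriz (deslocaEsq matriz)

-- ===== LEMMAS AND PROOFS =====

-- the inner loop, started at index k with current state s (same length as the row), shifts s[k..] left and zeroes the last slot
lemma pvInnerA_loop (n : ℕ) (cnt : ℕ) : ∀ (k : ℕ) (s : List Int), s.length = n → n - k = cnt →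
    (PySem.List.pyRange (k : Int) (n : Int) 1).foldl
      (fun s j =>
        if j ≠ (n : Int) - 1 then s.set j.toNat (s.getD (j.toNat + 1) 0)
        else s.set j.toNat 0) s
      = if k < n then s.take k ++ s.drop (k + 1) ++ [0] else s := by
  induction cnt with
  | zero =>
    intro k s hs hk
    have hkn : n ≤ k := by omega
    rw [PySem.List.pyRange_one_eq_nil (by exact_mod_cast hkn)]
    simp [Nat.not_lt.mpr hkn]
  | succ c ih =>
    intro k s hs hk
    have hkn : k < n := by omega
    rw [PySem.List.pyRange_one_cons (by exact_mod_cast hkn)]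
    simp only [List.foldl_cons, Int.toNat_natCast]
    by_cases hlast : (k : Int) = (n : Int) - 1
    · have hkn' : k + 1 = n := by omega
      rw [if_neg (by simp [hlast])]
      rw [show ((k : Int) + 1) = ((n : ℕ) : Int) by omega]
      rw [PySem.List.pyRange_one_eq_nil (le_refl _)]
      simp only [List.foldl_nil]
      rw [if_pos hkn]
      rw [List.set_eq_take_append_cons_drop, if_pos (by omega),
          List.drop_eq_nil_of_le (by omega : s.length ≤ k + 1)]
      simp
    · have hk2 : k + 1 < n := by omega
      rw [if_pos hlast]
      set v := s.getD (k + 1) 0 with hv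
      set s' := s.set k v with hs'
      have hlen' : s'.length = n := by simp [hs', hs]
      have hrec := ih (k + 1) s' hlen' (by omega)
      rw [show ((k : Int) + 1) = ((k + 1 : ℕ) : Int) by push_cast; ring]
      rw [hrec, if_pos hk2, if_pos hkn]
      have hsplit : s' = s.take k ++ v :: s.drop (k + 1) := by
        rw [hs', List.set_eq_take_append_cons_drop, if_pos (by omega)]
      have htake : s'.take (k + 1) = s.take k ++ [v] := by
        rw [hsplit, List.take_append, List.take_take]
        have hL : (s.take k).length = k := by simp [List.length_take]; omega
        rw [Nat.min_eq_right (by omega : k ≤ k + 1), hL,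
            show k + 1 - k = 1 by omega]
        simp
      have hdrop' : s'.drop (k + 1 + 1) = s.drop (k + 2) := by
        rw [hs', List.drop_set, if_pos (by omega)]
      have hdrop2 : s.drop (k + 1) = v :: s.drop (k + 2) := by
        rw [hv, List.getD_eq_getElem _ _ (by omega), List.drop_eq_getElem_cons (by omega)]
      rw [htake, hdrop', hdrop2]
      simp

-- the inner loop on a whole row computes B's per-row rebuild
lemma pvInnerA_eq (r : List Int) :
    pvInnerA r = if r.isEmpty then r else r.drop 1 ++ [0] := by
  unfold pvInnerA
  have h := pvInnerA_loop r.length r.length 0 r rfl (by omega)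
  simp only [Nat.cast_zero] at h
  rw [h]
  cases r with
  | nil => simp
  | cons a t => simp

-- the outer loop, started at index k, maps pvInnerA over the tail from k
lemma deslocaEsq_loop (cnt : ℕ) : ∀ (n k : ℕ) (s : List (List Int)), s.length = n → n - k = cnt →
    (PySem.List.pyRange (k : Int) (n : Int) 1).foldl
      (fun m i => m.set i.toNat (pvInnerA (m.getD i.toNat []))) s
      = s.take k ++ (s.drop k).map pvInnerA := by
  induction cnt with
  | zero =>
    intro n k s hs hk
    have hkn : n ≤ k := by omega
    rw [PySem.List.pyRange_one_eq_nil (by exact_mod_cast hkn)]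
    rw [List.take_of_length_le (by omega), List.drop_eq_nil_of_le (by omega)]
    simp
  | succ c ih =>
    intro n k s hs hk
    have hkn : k < n := by omega
    rw [PySem.List.pyRange_one_cons (by exact_mod_cast hkn)]
    simp only [List.foldl_cons, Int.toNat_natCast]
    set v := pvInnerA (s.getD k []) with hv
    set s' := s.set k v with hs'
    have hlen' : s'.length = n := by simp [hs', hs]
    have hrec := ih n (k + 1) s' hlen' (by omega)
    rw [show ((k : Int) + 1) = ((k + 1 : ℕ) : Int) by push_cast; ring]
    rw [hrec]
    have hsplit : s' = s.take k ++ v :: s.drop (k + 1) := by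
      rw [hs', List.set_eq_take_append_cons_drop, if_pos (by omega)]
    have htake : s'.take (k + 1) = s.take k ++ [v] := by
      rw [hsplit, List.take_append, List.take_take]
      have hL : (s.take k).length = k := by simp [List.length_take]; omega
      rw [Nat.min_eq_right (by omega : k ≤ k + 1), hL,
          show k + 1 - k = 1 by omega]
      simp
    have hdrop' : s'.drop (k + 1) = s.drop (k + 1) := by
      rw [hs', List.drop_set, if_pos (by omega)]
    have hvval : v = pvInnerA (s[k]'(by omega)) := by
      rw [hv, List.getD_eq_getElem _ _ (by omega)]
    have hdrop2 : s.drop k = s[k]'(by omega) :: s.drop (k + 1) := by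
      rw [List.drop_eq_getElem_cons (by omega)]
    rw [htake, hdrop', hdrop2, hvval, List.map_cons, List.append_assoc, List.singleton_append]

-- ===== VERDICT (by name: the statement is the Claim_ definition above) =====
theorem deslocaEsq_spec : Claim_equal_deslocaEsq := by
  intro matriz _
  unfold Spec_deslocaEsq deslocaEsq deslocaEsq_alt
  have h := deslocaEsq_loop matriz.length matriz.length 0 matriz rfl (by omega)
  simp only [Nat.cast_zero] at h
  rw [h]
  simp [pvInnerA_eq]
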